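-- pv_equiv track=rewrite | github.com/HorvathHajnalka/LeetCode | keys-and-rooms.py | canVisitAllRooms
-- ===== SOURCE A (Python) =====
-- def canVisitAllRooms(rooms):
--     """
--     :type rooms: List[List[int]]
--     :rtype: bool
--     """
--     rooms_dict = {}
--     for i in range(0, len(rooms)):
--         rooms_dict[i] = rooms[i]
--     visited = set()
--     queue = [0]
--     while queue:
--         node = queue.pop(0)
--         if node not in visited:
--             visited.add(node)
--             queue.extend(rooms_dict[node])
--     if len(visited) == len(rooms):
--         return True
--     return False
-- ===== SOURCE B (Python) =====
-- def canVisitAllRooms(rooms):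
--     visited = {0}
--     frontier = {0}
--     while frontier:
--         frontier = {key for node in frontier for key in rooms[node]} - visited
--         visited |= frontier
--     return len(visited) == len(rooms)
-- ===== Notes on version B (the rewrite author's own statement) =====
-- stated objective: alternative
-- what changed: Replaces A's FIFO queue with list.pop(0), per-node visited test and redundant rooms_dict by a level-synchronous set-saturation: each round expands the whole frontier at once with a set comprehension and set difference/union, eliminating pop(0), the dict and duplicate enqueues.
import Mathlib
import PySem

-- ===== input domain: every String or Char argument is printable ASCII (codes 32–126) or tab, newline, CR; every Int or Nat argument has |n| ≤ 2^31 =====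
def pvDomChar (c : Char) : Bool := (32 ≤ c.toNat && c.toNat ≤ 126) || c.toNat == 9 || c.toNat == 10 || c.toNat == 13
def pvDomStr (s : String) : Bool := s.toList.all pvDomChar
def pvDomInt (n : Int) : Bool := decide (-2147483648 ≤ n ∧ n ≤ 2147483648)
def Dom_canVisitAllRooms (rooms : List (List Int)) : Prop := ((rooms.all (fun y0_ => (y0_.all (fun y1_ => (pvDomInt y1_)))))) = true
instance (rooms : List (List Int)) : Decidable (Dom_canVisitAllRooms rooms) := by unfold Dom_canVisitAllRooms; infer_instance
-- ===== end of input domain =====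

-- B replaces A's FIFO queue (list.pop(0)) + rooms_dict BFS by a level-synchronous set-saturation
-- (whole-frontier expansion with set difference/union); equal return value on Pre_ (no mutation of the argument).

-- ===== PORT A =====
-- the while loop of A; fuel only makes the recursion total — under Pre_ it never runs out
-- (each iteration pops one element and at most 1 + sum of row lengths elements are ever enqueued).
-- Dict.get? = none is where Python raises KeyError (excluded by Pre_).
def pvLoopA (d : PySem.Dict Int (List Int)) : Nat → PySem.Set Int → List Int → PySem.Set Int
  | 0, visited, _ => visited
  | fuel+1, visited, queue =>
    match queue with
    | [] => visited
    | node :: rest =>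
      if PySem.Set.contains visited node then pvLoopA d fuel visited rest
      else
        match PySem.Dict.get? d node with
        | none => visited
        | some row => pvLoopA d fuel (PySem.Set.add visited node) (rest ++ row)

def canVisitAllRooms (rooms : List (List Int)) : Bool :=
  let rooms_dict : PySem.Dict Int (List Int) :=
    (PySem.List.pyRange 0 (PySem.List.len rooms) 1).foldl
      (fun d i => PySem.Dict.insert d i (PySem.List.pyGetD rooms i [])) PySem.Dict.empty
  let visited := pvLoopA rooms_dict (1 + (rooms.map List.length).sum) PySem.Set.empty [0]
  if PySem.Set.len visited == PySem.List.len rooms then true else false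

-- ===== PORT B =====
-- {key for node in frontier for key in rooms[node]}  (pyGet? = none is Python's IndexError, excluded by Pre_)
def pvNextB (rooms : List (List Int)) (frontier : PySem.Set Int) : PySem.Set Int :=
  frontier.foldl (fun s node => PySem.Set.update s ((PySem.List.pyGet? rooms node).getD [])) PySem.Set.empty

-- the while loop of B; fuel only makes the recursion total — under Pre_ each non-final round
-- strictly grows visited inside range(len(rooms)), so rooms.length + 1 rounds suffice.
def pvLoopB (rooms : List (List Int)) : Nat → PySem.Set Int → PySem.Set Int → PySem.Set Int
  | 0, visited, _ => visited
  | fuel+1, visited, frontier =>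
    if frontier.isEmpty then visited
    else
      let f' := PySem.Set.diff (pvNextB rooms frontier) visited
      pvLoopB rooms fuel (PySem.Set.union visited f') f'

def canVisitAllRooms_alt (rooms : List (List Int)) : Bool :=
  let start : PySem.Set Int := PySem.Set.add PySem.Set.empty 0
  let visited := pvLoopB rooms (rooms.length + 1) start start
  PySem.Set.len visited == PySem.List.len rooms

-- ===== PRECONDITION & SPEC =====
-- helpers for the precondition: the neighbour row of a room index and the keys
-- transitively reachable from room 0 (only valid room indices can be expanded)
def pvNbrs (rooms : List (List Int)) (v : Int) : List Int :=
  if h : 0 ≤ v ∧ v.toNat < rooms.length then rooms[v.toNat]'h.2 else []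

inductive PvReach (rooms : List (List Int)) : Int → Prop
  | zero : PvReach rooms 0
  | step {u k : Int} : PvReach rooms u → k ∈ pvNbrs rooms u → PvReach rooms k

-- a computable closure, used ONLY to decide Pre_ below (the lemmas down to pvReachList_props
-- exist for the Decidable instance)
def pvGrow (rooms : List (List Int)) (S : PySem.Set Int) : PySem.Set Int :=
  S.foldl (fun acc v => PySem.Set.update acc (pvNbrs rooms v)) S

def pvClos (rooms : List (List Int)) : Nat → PySem.Set Int → PySem.Set Int
  | 0, S => S
  | fuel+1, S =>
    let S' := pvGrow rooms S
    if S'.length = S.length then S else pvClos rooms fuel S'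

def pvReachList (rooms : List (List Int)) : List Int :=
  pvClos rooms (1 + (rooms.map List.length).sum) [0]

-- membership through B's frontier expansion
lemma pv_mem_foldl_update (g : Int → List Int) (l : List Int) (s0 : PySem.Set Int) (y : Int) :
    y ∈ l.foldl (fun s v => PySem.Set.update s (g v)) s0 ↔ y ∈ s0 ∨ ∃ v ∈ l, y ∈ g v := by
  induction l generalizing s0 with
  | nil => simp
  | cons v l ih =>
    rw [List.foldl_cons, ih, PySem.Set.mem_update]
    simp only [List.mem_cons]
    constructor
    · rintro ((h | h) | ⟨w, hw, hy⟩)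
      · exact Or.inl h
      · exact Or.inr ⟨v, Or.inl rfl, h⟩
      · exact Or.inr ⟨w, Or.inr hw, hy⟩
    · rintro (h | ⟨w, (rfl | hw), hy⟩)
      · exact Or.inl (Or.inl h)
      · exact Or.inl (Or.inr hy)
      · exact Or.inr ⟨w, hw, hy⟩

lemma pv_nodup_foldl_update (g : Int → List Int) (l : List Int) (s0 : PySem.Set Int) (h : s0.Nodup) :
    (l.foldl (fun s v => PySem.Set.update s (g v)) s0).Nodup := by
  induction l generalizing s0 with
  | nil => exact h
  | cons v l ih => exact ih _ (PySem.Set.nodup_update _ _ h)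

lemma pv_mem_grow (rooms : List (List Int)) (S : PySem.Set Int) (x : Int) :
    x ∈ pvGrow rooms S ↔ x ∈ S ∨ ∃ v ∈ S, x ∈ pvNbrs rooms v :=
  pv_mem_foldl_update (pvNbrs rooms) S S x

lemma pv_grow_closed (rooms : List (List Int)) (S : PySem.Set Int) (hnd : S.Nodup)
    (h : (pvGrow rooms S).length = S.length) :
    ∀ v ∈ S, ∀ k ∈ pvNbrs rooms v, k ∈ S := by
  classical
  have hndg : (pvGrow rooms S).Nodup := pv_nodup_foldl_update _ _ _ hnd
  have hsub : S.toFinset ⊆ (pvGrow rooms S).toFinset := by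
    intro x hx
    exact List.mem_toFinset.mpr ((pv_mem_grow rooms S x).mpr (Or.inl (List.mem_toFinset.mp hx)))
  have hcard : (pvGrow rooms S).toFinset.card ≤ S.toFinset.card := by
    rw [List.toFinset_card_of_nodup hnd, List.toFinset_card_of_nodup hndg]
    omega
  have heq : S.toFinset = (pvGrow rooms S).toFinset := Finset.eq_of_subset_of_card_le hsub hcard
  intro v hv k hk
  have : k ∈ (pvGrow rooms S).toFinset :=
    List.mem_toFinset.mpr ((pv_mem_grow rooms S k).mpr (Or.inr ⟨v, hv, hk⟩))
  rw [← heq] at this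
  exact List.mem_toFinset.mp this

lemma pv_nbrs_sub_flatten (rooms : List (List Int)) (v k : Int) (hk : k ∈ pvNbrs rooms v) :
    k ∈ rooms.flatten := by
  unfold pvNbrs at hk
  split at hk
  · exact List.mem_flatten.mpr ⟨_, List.getElem_mem _, hk⟩
  · simp at hk

lemma pvClos_spec (rooms : List (List Int)) :
    ∀ (fuel : Nat) (S : PySem.Set Int), S.Nodup →
    (∀ x ∈ S, x = 0 ∨ x ∈ rooms.flatten) →
    (∀ x ∈ S, PvReach rooms x) →
    2 + rooms.flatten.length ≤ fuel + S.length →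
    let R := pvClos rooms fuel S
    (∀ x ∈ S, x ∈ R) ∧ (∀ v ∈ R, ∀ k ∈ pvNbrs rooms v, k ∈ R) ∧ (∀ x ∈ R, PvReach rooms x) := by
  intro fuel
  induction fuel with
  | zero =>
    intro S hnd hel hrs hfuel
    exfalso
    -- a nodup list inside 0 :: rooms.flatten cannot be longer than 1 + its length
    have hsub : S.toFinset ⊆ ((0 : Int) :: rooms.flatten).toFinset := by
      intro x hx
      rcases hel x (List.mem_toFinset.mp hx) with rfl | h
      · exact List.mem_toFinset.mpr (List.mem_cons_self)
      · exact List.mem_toFinset.mpr (List.mem_cons_of_mem _ h)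
    have h1 := Finset.card_le_card hsub
    have h2 := List.toFinset_card_le ((0 : Int) :: rooms.flatten)
    rw [List.toFinset_card_of_nodup hnd] at h1
    simp only [List.length_cons] at h2
    omega
  | succ fuel ih =>
    intro S hnd hel hrs hfuel
    show _ ∧ _
    simp only [pvClos]
    by_cases hst : (pvGrow rooms S).length = S.length
    · rw [if_pos hst]
      exact ⟨fun x hx => hx, pv_grow_closed rooms S hnd hst, hrs⟩
    · rw [if_neg hst]
      have hndg : (pvGrow rooms S).Nodup := pv_nodup_foldl_update _ _ _ hnd
      have hle : S.length ≤ (pvGrow rooms S).length := by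
        have hsub : S.toFinset ⊆ (pvGrow rooms S).toFinset := by
          intro x hx
          exact List.mem_toFinset.mpr
            ((pv_mem_grow rooms S x).mpr (Or.inl (List.mem_toFinset.mp hx)))
        have := Finset.card_le_card hsub
        rw [List.toFinset_card_of_nodup hnd, List.toFinset_card_of_nodup hndg] at this
        omega
      have hel' : ∀ x ∈ pvGrow rooms S, x = 0 ∨ x ∈ rooms.flatten := by
        intro x hx
        rcases (pv_mem_grow rooms S x).mp hx with h | ⟨v, _, hv⟩
        · exact hel x h
        · exact Or.inr (pv_nbrs_sub_flatten rooms v x hv)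
      have hrs' : ∀ x ∈ pvGrow rooms S, PvReach rooms x := by
        intro x hx
        rcases (pv_mem_grow rooms S x).mp hx with h | ⟨v, hv, hkv⟩
        · exact hrs x h
        · exact PvReach.step (hrs v hv) hkv
      obtain ⟨c1, c2, c3⟩ := ih (pvGrow rooms S) hndg hel' hrs' (by omega)
      exact ⟨fun x hx => c1 x ((pv_mem_grow rooms S x).mpr (Or.inl hx)), c2, c3⟩

lemma pvReachList_props (rooms : List (List Int)) :
    (∀ k, PvReach rooms k → k ∈ pvReachList rooms) ∧
      (∀ k ∈ pvReachList rooms, PvReach rooms k) := by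
  have hflat : rooms.flatten.length = (rooms.map List.length).sum := by
    simp [List.length_flatten]
  obtain ⟨c1, c2, c3⟩ := pvClos_spec rooms (1 + (rooms.map List.length).sum) [0]
    (by simp) (by intro x hx; rcases List.mem_singleton.mp hx with rfl; exact Or.inl rfl)
    (by intro x hx; rcases List.mem_singleton.mp hx with rfl; exact PvReach.zero)
    (by simp only [List.length_singleton]; omega)
  refine ⟨fun k hk => ?_, c3⟩
  induction hk with
  | zero => exact c1 0 (List.mem_singleton.mpr rfl)
  | step hu hkn ih => exact c2 _ ih _ hkn

-- Pre_ is exactly where A returns normally: rooms is nonempty and every key transitively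
-- reachable from room 0 is a valid room index; on the complement A raises KeyError the
-- moment an out-of-range key is dequeued.
def Pre_canVisitAllRooms (rooms : List (List Int)) : Prop :=
  rooms ≠ [] ∧ ∀ k, PvReach rooms k → 0 ≤ k ∧ k < (rooms.length : Int)
instance (rooms : List (List Int)) : Decidable (Pre_canVisitAllRooms rooms) :=
  decidable_of_iff (rooms ≠ [] ∧ ∀ k ∈ pvReachList rooms, 0 ≤ k ∧ k < (rooms.length : Int))
    (by
      unfold Pre_canVisitAllRooms
      constructor
      · rintro ⟨h1, h2⟩
        exact ⟨h1, fun k hk => h2 k ((pvReachList_props rooms).1 k hk)⟩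
      · rintro ⟨h1, h2⟩
        exact ⟨h1, fun k hk => h2 k ((pvReachList_props rooms).2 k hk)⟩)

def pvWitness_canVisitAllRooms : List (List Int) := [[1, 2], [0], []]

def Spec_canVisitAllRooms (rooms : List (List Int)) (out : Bool) : Prop := out = canVisitAllRooms_alt rooms
instance (rooms : List (List Int)) (out : Bool) : Decidable (Spec_canVisitAllRooms rooms out) := by unfold Spec_canVisitAllRooms; infer_instance

-- ===== CLAIM (what is proved, stated in full; the proofs are below) =====
def Claim_equal_canVisitAllRooms : Prop := ∀ (rooms : List (List Int)), Dom_canVisitAllRooms rooms → Pre_canVisitAllRooms rooms → Spec_canVisitAllRooms rooms (canVisitAllRooms rooms)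

-- ===== LEMMAS AND PROOFS =====

def pvInR (rooms : List (List Int)) (v : Int) : Prop := 0 ≤ v ∧ v < (rooms.length : Int)

-- remaining work for A's fuel bound
def pvWt (rooms : List (List Int)) (vis : List Int) : Nat :=
  ∑ i ∈ Finset.range rooms.length, if (i : Int) ∈ vis then 0 else (pvNbrs rooms (i : Int)).length

lemma pvNbrs_eq_getD (rooms : List (List Int)) (v : Int) (h : pvInR rooms v) :
    PySem.List.pyGetD rooms v [] = pvNbrs rooms v := by
  obtain ⟨h1, h2⟩ := h
  have ht : v.toNat < rooms.length := by omega
  rw [PySem.List.pyGetD_eq_getElem rooms [] h1 (by simpa using h2)]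
  simp [pvNbrs, h1, ht]

lemma pvNbrs_eq_get? (rooms : List (List Int)) (v : Int) (h : pvInR rooms v) :
    (PySem.List.pyGet? rooms v).getD [] = pvNbrs rooms v := by
  obtain ⟨h1, h2⟩ := h
  have ht : v.toNat < rooms.length := by omega
  rw [PySem.List.pyGet?_eq_some_getElem rooms h1 (by simpa using h2)]
  simp [pvNbrs, h1, ht]

lemma pv_len_le (rooms : List (List Int)) (l : List Int) (hn : l.Nodup)
    (h : ∀ x ∈ l, pvInR rooms x) : l.length ≤ rooms.length := by
  classical
  have hsub : l.toFinset ⊆ (Finset.range rooms.length).image (fun i : Nat => (i : Int)) := by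
    intro x hx
    obtain ⟨h1, h2⟩ := h x (List.mem_toFinset.mp hx)
    simp only [Finset.mem_image, Finset.mem_range]
    exact ⟨x.toNat, by omega, by omega⟩
  have h1 := Finset.card_le_card hsub
  have h2 : ((Finset.range rooms.length).image (fun i : Nat => (i : Int))).card ≤ rooms.length := by
    calc _ ≤ (Finset.range rooms.length).card := Finset.card_image_le
    _ = rooms.length := Finset.card_range _
  rw [List.toFinset_card_of_nodup hn] at h1
  omega

lemma pvWt_step (rooms : List (List Int)) (vis : PySem.Set Int) (node : Int)
    (hin : pvInR rooms node) (hnm : node ∉ vis) :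
    pvWt rooms vis = pvWt rooms (PySem.Set.add vis node) + (pvNbrs rooms node).length := by
  classical
  obtain ⟨h1, h2⟩ := hin
  have ht : node.toNat ∈ Finset.range rooms.length := by
    simp only [Finset.mem_range]; omega
  unfold pvWt
  rw [← Finset.sum_erase_add _ _ ht, ← Finset.sum_erase_add _ _ ht]
  have hcongr : ∀ i ∈ (Finset.range rooms.length).erase node.toNat,
      (if (i : Int) ∈ PySem.Set.add vis node then 0 else (pvNbrs rooms (i : Int)).length)
      = (if (i : Int) ∈ vis then 0 else (pvNbrs rooms (i : Int)).length) := by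
    intro i hi
    have hne : i ≠ node.toNat := (Finset.mem_erase.mp hi).1
    have : ((i : Int) ∈ PySem.Set.add vis node) ↔ ((i : Int) ∈ vis) := by
      rw [PySem.Set.mem_add]
      constructor
      · rintro (h | h)
        · exact h
        · exfalso; omega
      · exact Or.inl
    simp only [this]
  rw [Finset.sum_congr rfl hcongr]
  have hnode : ((node.toNat : Int)) = node := by omega
  rw [hnode]
  have hv : (if node ∈ vis then 0 else (pvNbrs rooms node).length) = (pvNbrs rooms node).length := by
    simp [hnm]
  have hv' : (if node ∈ PySem.Set.add vis node then 0 else (pvNbrs rooms node).length) = 0 := by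
    simp [PySem.Set.mem_add]
  rw [hv, hv']
  omega

lemma pv_sum_aux : ∀ (l : List (List Int)),
    ∑ i ∈ Finset.range l.length, (l.getD i []).length = (l.map List.length).sum := by
  intro l
  induction l with
  | nil => simp
  | cons x l ih =>
    rw [List.length_cons, Finset.sum_range_succ']
    simp only [List.getD_cons_succ, List.getD_cons_zero, List.map_cons, List.sum_cons]
    omega

lemma pvWt_nil (rooms : List (List Int)) : pvWt rooms [] = (rooms.map List.length).sum := by
  unfold pvWt
  rw [← pv_sum_aux rooms]
  apply Finset.sum_congr rfl
  intro i hi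
  have hilt : i < rooms.length := Finset.mem_range.mp hi
  simp only [List.not_mem_nil, if_false]
  have : pvNbrs rooms (i : Int) = rooms[i] := by
    simp [pvNbrs, hilt]
  rw [this, List.getD_eq_getElem _ _ hilt]

-- the dict A builds is just indexing
lemma pvDictA_get (rooms : List (List Int)) (node : Int) :
    PySem.Dict.get? ((PySem.List.pyRange 0 (PySem.List.len rooms) 1).foldl
      (fun d i => PySem.Dict.insert d i (PySem.List.pyGetD rooms i [])) PySem.Dict.empty) node
    = if 0 ≤ node ∧ node < (rooms.length : Int) then some (PySem.List.pyGetD rooms node []) else none := by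
  classical
  have aux : ∀ (m : Nat) (d0 : PySem.Dict Int (List Int)),
      PySem.Dict.get? ((PySem.List.pyRange 0 (m : Int) 1).foldl
        (fun d i => PySem.Dict.insert d i (PySem.List.pyGetD rooms i [])) d0) node
      = if 0 ≤ node ∧ node < (m : Int) then some (PySem.List.pyGetD rooms node []) else d0.get? node := by
    intro m
    induction m with
    | zero =>
      intro d0
      rw [PySem.List.pyRange_one_eq_nil (by omega)]
      simp only [List.foldl_nil]
      rw [if_neg (by omega)]
    | succ m ih =>
      intro d0
      have hcast : ((m + 1 : Nat) : Int) = (m : Int) + 1 := by push_cast; ring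
      rw [hcast, PySem.List.pyRange_one_succ_right (by omega), List.foldl_append]
      simp only [List.foldl_cons, List.foldl_nil]
      rw [PySem.Dict.get?_insert, ih d0]
      by_cases he : node = (m : Int)
      · rw [if_pos he, if_pos (by omega), he]
      · rw [if_neg he]
        by_cases hlt : 0 ≤ node ∧ node < (m : Int)
        · rw [if_pos hlt, if_pos (by omega)]
        · rw [if_neg hlt, if_neg (by omega)]
  have hlen : PySem.List.len rooms = (rooms.length : Int) := by simp
  rw [hlen, aux rooms.length PySem.Dict.empty]
  by_cases h : 0 ≤ node ∧ node < (rooms.length : Int)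
  · rw [if_pos h, if_pos h]
  · rw [if_neg h, if_neg h, PySem.Dict.get?_empty]

-- A's loop invariant
lemma pvLoopA_spec (rooms : List (List Int))
    (hreach : ∀ k, PvReach rooms k → pvInR rooms k) :
    ∀ (fuel : Nat) (visited : PySem.Set Int) (queue : List Int),
    visited.Nodup →
    (∀ x ∈ visited, pvInR rooms x ∧ PvReach rooms x) →
    (∀ x ∈ visited, ∀ k ∈ pvNbrs rooms x, k ∈ visited ∨ k ∈ queue) →
    (∀ x ∈ queue, pvInR rooms x ∧ PvReach rooms x) →
    queue.length + pvWt rooms visited ≤ fuel →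
    let R := pvLoopA ((PySem.List.pyRange 0 (PySem.List.len rooms) 1).foldl
      (fun d i => PySem.Dict.insert d i (PySem.List.pyGetD rooms i [])) PySem.Dict.empty) fuel visited queue
    R.Nodup ∧ (∀ x ∈ R, PvReach rooms x) ∧ (∀ x ∈ visited, x ∈ R) ∧ (∀ x ∈ queue, x ∈ R) ∧
      (∀ v ∈ R, ∀ k ∈ pvNbrs rooms v, k ∈ R) := by
  intro fuel
  induction fuel with
  | zero =>
    intro visited queue h1 h2 h3 h4 h5
    have hq : queue = [] := by
      have := List.length_eq_zero_iff.mp (by omega : queue.length = 0)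
      exact this
    subst hq
    refine ⟨h1, fun x hx => (h2 x hx).2, fun x hx => hx, by simp, ?_⟩
    intro v hv k hk
    rcases h3 v hv k hk with h | h
    · exact h
    · simp at h
  | succ fuel ih =>
    intro visited queue h1 h2 h3 h4 h5
    match queue with
    | [] =>
      refine ⟨h1, fun x hx => (h2 x hx).2, fun x hx => hx, by simp, ?_⟩
      intro v hv k hk
      rcases h3 v hv k hk with h | h
      · exact h
      · simp at h
    | node :: rest =>
      show _ ∧ _
      simp only [pvLoopA]
      by_cases hm : node ∈ visited
      · rw [if_pos ((PySem.Set.contains_iff visited node).mpr hm)]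
        have h3' : ∀ x ∈ visited, ∀ k ∈ pvNbrs rooms x, k ∈ visited ∨ k ∈ rest := by
          intro x hx k hk
          rcases h3 x hx k hk with h | h
          · exact Or.inl h
          · rcases List.mem_cons.mp h with rfl | h
            · exact Or.inl hm
            · exact Or.inr h
        obtain ⟨c1, c2, c3, c4, c5⟩ := ih visited rest h1 h2 h3'
          (fun x hx => h4 x (List.mem_cons_of_mem _ hx)) (by simp at h5 ⊢; omega)
        refine ⟨c1, c2, c3, ?_, c5⟩
        intro x hx
        rcases List.mem_cons.mp hx with rfl | hx
        · exact c3 _ hm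
        · exact c4 _ hx
      · rw [if_neg (by simp only [Bool.not_eq_true]; rw [← Bool.not_eq_true, PySem.Set.contains_iff]; exact hm)]
        have hin : pvInR rooms node := (h4 node (List.mem_cons_self)).1
        rw [pvDictA_get rooms node, if_pos (show 0 ≤ node ∧ node < (rooms.length : Int) from hin)]
        have hrow : PySem.List.pyGetD rooms node [] = pvNbrs rooms node := pvNbrs_eq_getD rooms node hin
        rw [hrow]
        have hnods : (PySem.Set.add visited node).Nodup := PySem.Set.nodup_add _ _ h1
        have h2' : ∀ x ∈ PySem.Set.add visited node, pvInR rooms x ∧ PvReach rooms x := by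
          intro x hx
          rcases (PySem.Set.mem_add visited node x).mp hx with h | rfl
          · exact h2 x h
          · exact h4 x (List.mem_cons_self)
        have h3' : ∀ x ∈ PySem.Set.add visited node, ∀ k ∈ pvNbrs rooms x,
            k ∈ PySem.Set.add visited node ∨ k ∈ rest ++ pvNbrs rooms node := by
          intro x hx k hk
          rcases (PySem.Set.mem_add visited node x).mp hx with h | rfl
          · rcases h3 x h k hk with h' | h'
            · exact Or.inl ((PySem.Set.mem_add visited node k).mpr (Or.inl h'))
            · rcases List.mem_cons.mp h' with rfl | h'
              · exact Or.inl ((PySem.Set.mem_add visited k k).mpr (Or.inr rfl))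
              · exact Or.inr (List.mem_append_left _ h')
          · exact Or.inr (List.mem_append_right _ hk)
        have h4' : ∀ x ∈ rest ++ pvNbrs rooms node, pvInR rooms x ∧ PvReach rooms x := by
          intro x hx
          rcases List.mem_append.mp hx with h | h
          · exact h4 x (List.mem_cons_of_mem _ h)
          · exact ⟨hreach x (PvReach.step (h4 node (List.mem_cons_self)).2 h),
              PvReach.step (h4 node (List.mem_cons_self)).2 h⟩
        have h5' : (rest ++ pvNbrs rooms node).length + pvWt rooms (PySem.Set.add visited node) ≤ fuel := by
          have hw := pvWt_step rooms visited node hin hm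
          simp only [List.length_append]
          simp only [List.length_cons] at h5
          omega
        obtain ⟨c1, c2, c3, c4, c5⟩ := ih (PySem.Set.add visited node) (rest ++ pvNbrs rooms node)
          hnods h2' h3' h4' h5'
        refine ⟨c1, c2, fun x hx => c3 _ ((PySem.Set.mem_add visited node x).mpr (Or.inl hx)), ?_, c5⟩
        intro x hx
        rcases List.mem_cons.mp hx with rfl | hx
        · exact c3 _ ((PySem.Set.mem_add visited x x).mpr (Or.inr rfl))
        · exact c4 _ (List.mem_append_left _ hx)

-- B's loop invariant
lemma pvLoopB_spec (rooms : List (List Int))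
    (hreach : ∀ k, PvReach rooms k → pvInR rooms k) :
    ∀ (fuel : Nat) (visited frontier : PySem.Set Int),
    visited.Nodup →
    (∀ x ∈ frontier, x ∈ visited) →
    (∀ x ∈ visited, pvInR rooms x ∧ PvReach rooms x) →
    (∀ v ∈ visited, v ∉ frontier → ∀ k ∈ pvNbrs rooms v, k ∈ visited) →
    (frontier ≠ [] → rooms.length + 1 ≤ visited.length + fuel) →
    let R := pvLoopB rooms fuel visited frontier
    R.Nodup ∧ (∀ x ∈ R, PvReach rooms x) ∧ (∀ x ∈ visited, x ∈ R) ∧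
      (∀ v ∈ R, ∀ k ∈ pvNbrs rooms v, k ∈ R) := by
  intro fuel
  induction fuel with
  | zero =>
    intro visited frontier h1 hsub h2 hcl hfuel
    by_cases hf : frontier = []
    · subst hf
      exact ⟨h1, fun x hx => (h2 x hx).2, fun x hx => hx,
        fun v hv k hk => hcl v hv (by simp) k hk⟩
    · exfalso
      have hle := pv_len_le rooms visited h1 (fun x hx => (h2 x hx).1)
      have := hfuel hf
      omega
  | succ fuel ih =>
    intro visited frontier h1 hsub h2 hcl hfuel
    show _ ∧ _
    simp only [pvLoopB]
    by_cases hf : frontier = []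
    · subst hf
      rw [if_pos (by simp : (([] : List Int).isEmpty) = true)]
      exact ⟨h1, fun x hx => (h2 x hx).2, fun x hx => hx,
        fun v hv k hk => hcl v hv (by simp) k hk⟩
    · rw [if_neg (by simp [List.isEmpty_iff, hf])]
      -- the frontier expansion is the union of the neighbour rows of frontier nodes
      have hnext : ∀ x, x ∈ pvNextB rooms frontier ↔ ∃ v ∈ frontier, x ∈ pvNbrs rooms v := by
        intro x
        unfold pvNextB
        rw [pv_mem_foldl_update]
        simp only [PySem.Set.empty, List.not_mem_nil, false_or]
        constructor
        · rintro ⟨v, hv, hx⟩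
          exact ⟨v, hv, by rwa [pvNbrs_eq_get? rooms v (h2 v (hsub v hv)).1] at hx⟩
        · rintro ⟨v, hv, hx⟩
          exact ⟨v, hv, by rwa [pvNbrs_eq_get? rooms v (h2 v (hsub v hv)).1]⟩
      set f' := PySem.Set.diff (pvNextB rooms frontier) visited with hf'
      have hmemf' : ∀ x, x ∈ f' ↔ (∃ v ∈ frontier, x ∈ pvNbrs rooms v) ∧ x ∉ visited := by
        intro x
        rw [hf', PySem.Set.mem_diff, hnext]
      have hnodf' : f'.Nodup :=
        PySem.Set.nodup_diff _ _ (pv_nodup_foldl_update _ _ _ List.nodup_nil)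
      have hdisj : ∀ x ∈ f', x ∉ visited := fun x hx => ((hmemf' x).mp hx).2
      have happ : PySem.Set.union visited f' = visited ++ f' :=
        PySem.Set.update_eq_append_of_disjoint visited f' hnodf' hdisj
      have hmemu : ∀ x, x ∈ PySem.Set.union visited f' ↔ x ∈ visited ∨ x ∈ f' :=
        fun x => PySem.Set.mem_union visited f' x
      have h2' : ∀ x ∈ PySem.Set.union visited f', pvInR rooms x ∧ PvReach rooms x := by
        intro x hx
        rcases (hmemu x).mp hx with h | h
        · exact h2 x h
        · obtain ⟨⟨v, hv, hx'⟩, _⟩ := (hmemf' x).mp h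
          exact ⟨hreach x (PvReach.step (h2 v (hsub v hv)).2 hx'),
            PvReach.step (h2 v (hsub v hv)).2 hx'⟩
      have hcl' : ∀ v ∈ PySem.Set.union visited f', v ∉ f' → ∀ k ∈ pvNbrs rooms v,
          k ∈ PySem.Set.union visited f' := by
        intro v hv hvf k hk
        rcases (hmemu v).mp hv with h | h
        · by_cases hvfr : v ∈ frontier
          · rcases Decidable.em (k ∈ visited) with hk' | hk'
            · exact (hmemu k).mpr (Or.inl hk')
            · exact (hmemu k).mpr (Or.inr ((hmemf' k).mpr ⟨⟨v, hvfr, hk⟩, hk'⟩))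
          · exact (hmemu k).mpr (Or.inl (hcl v h hvfr k hk))
        · exact absurd h hvf
      have hfuel' : f' ≠ [] → rooms.length + 1 ≤ (PySem.Set.union visited f').length + fuel := by
        intro hne
        have : 1 ≤ f'.length := by
          have := List.length_pos_iff.mpr hne
          omega
        have hlen : (PySem.Set.union visited f').length = visited.length + f'.length := by
          rw [happ, List.length_append]
        have := hfuel hf
        omega
      obtain ⟨c1, c2, c3, c4⟩ := ih (PySem.Set.union visited f') f'
        (PySem.Set.nodup_union _ _ h1)
        (fun x hx => (hmemu x).mpr (Or.inr hx)) h2' hcl' hfuel'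
      exact ⟨c1, c2, fun x hx => c3 _ ((hmemu x).mpr (Or.inl hx)), c4⟩

-- a sound, 0-containing, nbrs-closed set is exactly the reachable set
lemma pv_char (rooms : List (List Int)) (R : List Int)
    (hsound : ∀ x ∈ R, PvReach rooms x) (h0 : (0 : Int) ∈ R)
    (hcl : ∀ v ∈ R, ∀ k ∈ pvNbrs rooms v, k ∈ R) :
    ∀ x, x ∈ R ↔ PvReach rooms x := by
  intro x
  constructor
  · exact hsound x
  · intro hr
    induction hr with
    | zero => exact h0
    | step hu hk ih => exact hcl _ ih _ hk

-- ===== VERDICT (by name: the statement is the Claim_ definition above) =====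
theorem canVisitAllRooms_spec : Claim_equal_canVisitAllRooms := by
  unfold Claim_equal_canVisitAllRooms
  intro rooms hdom hpre
  unfold Spec_canVisitAllRooms canVisitAllRooms canVisitAllRooms_alt
  have hn : 0 < rooms.length := List.length_pos_iff.mpr hpre.1
  have hreach : ∀ k, PvReach rooms k → pvInR rooms k :=
    fun k hk => ⟨(hpre.2 k hk).1, (hpre.2 k hk).2⟩
  -- characterize A's visited set
  obtain ⟨a1, a2, a3, a4, a5⟩ := pvLoopA_spec rooms hreach (1 + (rooms.map List.length).sum)
    PySem.Set.empty [0]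
    (by simp [PySem.Set.empty])
    (by intro x hx; simp [PySem.Set.empty] at hx)
    (by intro x hx; simp [PySem.Set.empty] at hx)
    (by
      intro x hx
      rcases List.mem_singleton.mp hx with rfl
      exact ⟨⟨le_refl 0, by exact_mod_cast hn⟩, PvReach.zero⟩)
    (by
      show (1 : Nat) + pvWt rooms PySem.Set.empty ≤ _
      have : pvWt rooms PySem.Set.empty = (rooms.map List.length).sum := pvWt_nil rooms
      omega)
  have h0A : (0 : Int) ∈ pvLoopA _ (1 + (rooms.map List.length).sum) PySem.Set.empty [0] :=
    a4 0 (List.mem_singleton.mpr rfl)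
  have charA := pv_char rooms _ a2 h0A a5
  -- characterize B's visited set
  have hs : PySem.Set.add PySem.Set.empty (0 : Int) = [0] := rfl
  obtain ⟨b1, b2, b3, b4⟩ := pvLoopB_spec rooms hreach (rooms.length + 1)
    (PySem.Set.add PySem.Set.empty 0) (PySem.Set.add PySem.Set.empty 0)
    (by rw [hs]; simp)
    (fun x hx => hx)
    (by
      intro x hx
      rw [hs] at hx
      rcases List.mem_singleton.mp hx with rfl
      exact ⟨⟨le_refl 0, by exact_mod_cast hn⟩, PvReach.zero⟩)
    (fun v hv hnv k hk => absurd hv hnv)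
    (by intro _; rw [hs]; simp)
  have h0B : (0 : Int) ∈ pvLoopB rooms (rooms.length + 1)
      (PySem.Set.add PySem.Set.empty 0) (PySem.Set.add PySem.Set.empty 0) := by
    apply b3
    rw [hs]
    exact List.mem_singleton.mpr rfl
  have charB := pv_char rooms _ b2 h0B b4
  -- same members, both nodup: equal lengths
  have hperm := (List.perm_ext_iff_of_nodup a1 b1).mpr
    (fun x => (charA x).trans ((charB x).symm))
  have hlen := hperm.length_eq
  have key : ∀ (x y : List Int), x.length = y.length →
      (if (PySem.Set.len x == PySem.List.len rooms) then true else false)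
        = (PySem.Set.len y == PySem.List.len rooms) := by
    intro x y hxy
    have hxy' : PySem.Set.len x = PySem.Set.len y := by
      simp [PySem.Set.len, hxy]
    rw [hxy']
    cases h : (PySem.Set.len y == PySem.List.len rooms)
    · simp
    · simp
  exact key _ _ hlen
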